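-- pv_equiv track=rewrite | github.com/njrun1804/wheel-trading | detect_circular_imports.py | categorize_cycles
-- ===== SOURCE A (Python) =====
-- def categorize_cycles(cycles: list[list[str]]) -> dict[str, list[list[str]]]:
--     """Categorize cycles by the components involved."""
--     categorized = {"einstein_bolt": [], "internal": [], "external": [], "other": []}
--
--     for cycle in cycles:
--         # Check if this involves Einstein and Bolt
--         has_einstein = any("einstein" in module.lower() for module in cycle)
--         has_bolt = any("bolt" in module.lower() for module in cycle)
--
--         if has_einstein and has_bolt:
--             categorized["einstein_bolt"].append(cycle)
--         elif all(
--             module.startswith("src.") or module.startswith("unity_wheel.")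
--             for module in cycle
--         ):
--             categorized["internal"].append(cycle)
--         elif any(
--             not (module.startswith("src.") or module.startswith("unity_wheel."))
--             for module in cycle
--         ):
--             categorized["external"].append(cycle)
--         else:
--             categorized["other"].append(cycle)
--
--     return categorized
-- ===== SOURCE B (Python) =====
-- def categorize_cycles(cycles: list[list[str]]) -> dict[str, list[list[str]]]:
--     """Categorize cycles by the components involved (single pass per cycle, then group by label)."""
--
--     def classify(cycle):
--         has_einstein = has_bolt = False
--         all_internal = True
--         for module in cycle:
--             low = module.lower()
--             if "einstein" in low:
--                 has_einstein = True
--             if "bolt" in low: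
--                 has_bolt = True
--             if not (module.startswith("src.") or module.startswith("unity_wheel.")):
--                 all_internal = False
--         if has_einstein and has_bolt:
--             return "einstein_bolt"
--         if all_internal:
--             return "internal"
--         return "external"
--
--     labels = [classify(cycle) for cycle in cycles]
--     return {
--         key: [cycle for cycle, label in zip(cycles, labels) if label == key]
--         for key in ("einstein_bolt", "internal", "external", "other")
--     }
-- ===== Notes on version B (the rewrite author's own statement) =====
-- stated objective: alternative
-- what changed: B classifies each cycle with one loop accumulating three booleans (instead of A's three separate any/all scans per cycle) and builds the result by grouping cycles by their label over the four fixed keys, instead of appending into pre-seeded dict buckets; A's unreachable 'other' bucket stays an empty list.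
import Mathlib
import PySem

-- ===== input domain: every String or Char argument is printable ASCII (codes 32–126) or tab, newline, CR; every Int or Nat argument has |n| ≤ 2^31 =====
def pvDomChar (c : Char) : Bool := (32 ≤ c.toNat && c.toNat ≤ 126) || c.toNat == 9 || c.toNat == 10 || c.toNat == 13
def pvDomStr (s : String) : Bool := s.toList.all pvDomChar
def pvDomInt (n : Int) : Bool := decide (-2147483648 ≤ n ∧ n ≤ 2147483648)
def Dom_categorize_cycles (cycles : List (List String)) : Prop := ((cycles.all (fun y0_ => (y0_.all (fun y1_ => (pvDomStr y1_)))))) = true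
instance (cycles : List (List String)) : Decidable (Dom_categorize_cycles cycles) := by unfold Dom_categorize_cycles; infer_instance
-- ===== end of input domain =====

-- B is a different decomposition of the same task: one accumulator loop per cycle instead of three scans, then grouping by label.

-- ===== PORT A =====
-- predicates ported with PySem.Str: "einstein" in m.lower(), "bolt" in m.lower(), m.startswith(...)
def pvHasE (m : String) : Bool := PySem.Str.isIn "einstein" (PySem.Str.lower m)
def pvHasB (m : String) : Bool := PySem.Str.isIn "bolt" (PySem.Str.lower m)
def pvInt (m : String) : Bool := PySem.Str.startswith m "src." || PySem.Str.startswith m "unity_wheel."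

def pvStepA (d : PySem.Dict String (List (List String)))
    (cycle : List String) : PySem.Dict String (List (List String)) :=
  let has_einstein := cycle.any pvHasE
  let has_bolt := cycle.any pvHasB
  if has_einstein && has_bolt then d.modify "einstein_bolt" [] (· ++ [cycle])
  else if cycle.all pvInt then d.modify "internal" [] (· ++ [cycle])
  else if cycle.any (fun m => !(pvInt m)) then d.modify "external" [] (· ++ [cycle])
  else d.modify "other" [] (· ++ [cycle])

def categorize_cycles (cycles : List (List String)) : List (String × List (List String)) :=
  (cycles.foldl pvStepA
    (PySem.Dict.ofList [("einstein_bolt", []), ("internal", []), ("external", []), ("other", [])])).items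

-- ===== PORT B =====
-- classify: ONE fold over the cycle accumulating (has_einstein, has_bolt, all_internal)
def pvClassify (cycle : List String) : String :=
  let st := cycle.foldl
    (fun (s : Bool × Bool × Bool) m =>
      (s.1 || pvHasE m, s.2.1 || pvHasB m, s.2.2 && pvInt m))
    (false, false, true)
  if st.1 && st.2.1 then "einstein_bolt"
  else if st.2.2 then "internal"
  else "external"

def categorize_cycles_alt (cycles : List (List String)) : List (String × List (List String)) :=
  let labels := cycles.map pvClassify
  ["einstein_bolt", "internal", "external", "other"].map
    (fun k => (k, ((cycles.zip labels).filter (fun p => p.2 == k)).map (·.1)))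

-- ===== PRECONDITION & SPEC =====
def Spec_categorize_cycles (cycles : List (List String)) (out : List (String × List (List String))) : Prop := out = categorize_cycles_alt cycles
instance (cycles : List (List String)) (out : List (String × List (List String))) : Decidable (Spec_categorize_cycles cycles out) := by unfold Spec_categorize_cycles; infer_instance

-- ===== CLAIM (what is proved, stated in full; the proofs are below) =====
def Claim_equal_categorize_cycles : Prop := ∀ (cycles : List (List String)), Dom_categorize_cycles cycles → Spec_categorize_cycles cycles (categorize_cycles cycles)

-- ===== LEMMAS AND PROOFS =====

-- B's accumulator fold equals the three separate scans
lemma classify_fold (cycle : List String) (a b c : Bool) :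
    cycle.foldl (fun (s : Bool × Bool × Bool) m =>
      (s.1 || pvHasE m, s.2.1 || pvHasB m, s.2.2 && pvInt m)) (a, b, c)
    = (a || cycle.any pvHasE, b || cycle.any pvHasB, c && cycle.all pvInt) := by
  induction cycle generalizing a b c with
  | nil => simp
  | cons x xs ih => simp [ih, Bool.or_assoc, Bool.and_assoc]

lemma classify_eq (cycle : List String) :
    pvClassify cycle =
      if cycle.any pvHasE && cycle.any pvHasB then "einstein_bolt"
      else if cycle.all pvInt then "internal" else "external" := by
  simp [pvClassify, classify_fold]

lemma classify_ne_other (cycle : List String) : pvClassify cycle ≠ "other" := by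
  rw [classify_eq]; split_ifs <;> decide

lemma any_not_of_not_all (l : List String) (h : l.all pvInt = false) :
    l.any (fun m => !(pvInt m)) = true := by
  rw [List.any_eq_true]
  by_contra hc
  push Not at hc
  have hall : l.all pvInt = true := by
    rw [List.all_eq_true]
    intro x hx
    simpa using hc x hx
  rw [hall] at h
  exact absurd h (by simp)

-- modify on the literal 4-key dict computes definitionally
lemma modE (es is xs os : List (List String)) (f : List (List String) → List (List String)) :
    (PySem.Dict.mk [("einstein_bolt", es), ("internal", is), ("external", xs), ("other", os)]).modify "einstein_bolt" [] f
    = PySem.Dict.mk [("einstein_bolt", f es), ("internal", is), ("external", xs), ("other", os)] := rfl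

lemma modI (es is xs os : List (List String)) (f : List (List String) → List (List String)) :
    (PySem.Dict.mk [("einstein_bolt", es), ("internal", is), ("external", xs), ("other", os)]).modify "internal" [] f
    = PySem.Dict.mk [("einstein_bolt", es), ("internal", f is), ("external", xs), ("other", os)] := rfl

lemma modX (es is xs os : List (List String)) (f : List (List String) → List (List String)) :
    (PySem.Dict.mk [("einstein_bolt", es), ("internal", is), ("external", xs), ("other", os)]).modify "external" [] f
    = PySem.Dict.mk [("einstein_bolt", es), ("internal", is), ("external", f xs), ("other", os)] := rfl

-- the loop invariant for A's fold
lemma loopA (l : List (List String)) (es is xs os : List (List String)) :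
    (l.foldl pvStepA (PySem.Dict.mk [("einstein_bolt", es), ("internal", is), ("external", xs), ("other", os)])).items
    = [("einstein_bolt", es ++ l.filter (fun c => pvClassify c == "einstein_bolt")),
       ("internal", is ++ l.filter (fun c => pvClassify c == "internal")),
       ("external", xs ++ l.filter (fun c => pvClassify c == "external")),
       ("other", os)] := by
  induction l generalizing es is xs os with
  | nil => simp
  | cons cycle t ih =>
    rw [List.foldl_cons]
    by_cases hE : (cycle.any pvHasE && cycle.any pvHasB) = true
    · have hc : pvClassify cycle = "einstein_bolt" := by rw [classify_eq, hE]; rfl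
      simp only [pvStepA, hE, if_true]
      rw [modE, ih]
      simp [hc]
    · have hEf : (cycle.any pvHasE && cycle.any pvHasB) = false := by
        simpa using hE
      by_cases hI : cycle.all pvInt = true
      · have hc : pvClassify cycle = "internal" := by
          rw [classify_eq]; simp [hEf, hI]
        simp only [pvStepA, hEf, Bool.false_eq_true, if_false, hI, if_true]
        rw [modI, ih]
        simp [hc]
      · have hI' : cycle.all pvInt = false := by simpa using hI
        have hany := any_not_of_not_all cycle hI'
        have hc : pvClassify cycle = "external" := by
          rw [classify_eq]; simp [hEf, hI']
        simp only [pvStepA, hEf, hI', Bool.false_eq_true, if_false, hany, if_true]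
        rw [modX, ih]
        simp [hc]

-- zip-with-labels filtering collapses to a plain filter
lemma zip_filter (cycles : List (List String)) (k : String) :
    ((cycles.zip (cycles.map pvClassify)).filter (fun p => p.2 == k)).map (·.1)
    = cycles.filter (fun c => pvClassify c == k) := by
  induction cycles with
  | nil => rfl
  | cons c t ih =>
    simp only [List.map_cons, List.zip_cons_cons, List.filter_cons]
    by_cases h : (pvClassify c == k) = true
    · simp [h, ih]
    · simp [h, ih]

lemma ofList_lit :
    (PySem.Dict.ofList ([("einstein_bolt", []), ("internal", []), ("external", []), ("other", [])] :
      List (String × List (List String))))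
    = PySem.Dict.mk [("einstein_bolt", []), ("internal", []), ("external", []), ("other", [])] := rfl

-- ===== VERDICT (by name: the statement is the Claim_ definition above) =====
theorem categorize_cycles_spec : Claim_equal_categorize_cycles := by
  intro cycles _
  unfold Spec_categorize_cycles categorize_cycles categorize_cycles_alt
  rw [ofList_lit, loopA]
  simp only [List.map_cons, List.map_nil, zip_filter]
  have hother : cycles.filter (fun c => pvClassify c == "other") = [] := by
    rw [List.filter_eq_nil_iff]
    intro c _
    simpa using classify_ne_other c
  simp [hother]
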